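-- pv_equiv track=rewrite | github.com/suyeonnii/Algorithm | 프로그래머스/0/181921. 배열 만들기 2/배열 만들기 2.py | solution
-- ===== SOURCE A (Python) =====
-- def solution(l, r):
--     from collections import deque
--
--     result = []
--     queue = deque(['5'])
--
--     while queue:
--         current = queue.popleft()
--         num = int(current)
--
--         if num > r:
--             continue
--         if num >= l:
--             result.append(num)
--
--         queue.append(current + '0')
--         queue.append(current + '5')
--
--     return sorted(result) if result else [-1]
-- ===== SOURCE B (Python) =====
-- def solution(l, r):
--     # Enumerate k = 1, 2, 3, ...: the binary digits of k, read as base-10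
--     # digits and scaled by 5, give exactly the numbers made of digits 0/5
--     # that start with 5, in strictly increasing order.  Collect those in
--     # [l, r] and stop at the first one above r; no sort is needed.
--     def val(k):
--         return 0 if k == 0 else 10 * val(k >> 1) + 5 * (k & 1)
--     res = []
--     k = 1
--     while True:
--         n = val(k)
--         if n > r:
--             break
--         if n >= l:
--             res.append(n)
--         k += 1
--     return res if res else [-1]
-- ===== Notes on version B (the rewrite author's own statement) =====
-- stated objective: alternative
-- what changed: Replaces A's string-building BFS over a deque (grow '5'+{0,5} strings, parse each with int(), sort at the end) by a purely arithmetic counter loop: k = 1,2,3,... mapped through val(k) = binary digits of k read as decimal, times 5, which yields the candidates already in increasing order, so no strings, no queue and no final sort.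
import Mathlib
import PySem

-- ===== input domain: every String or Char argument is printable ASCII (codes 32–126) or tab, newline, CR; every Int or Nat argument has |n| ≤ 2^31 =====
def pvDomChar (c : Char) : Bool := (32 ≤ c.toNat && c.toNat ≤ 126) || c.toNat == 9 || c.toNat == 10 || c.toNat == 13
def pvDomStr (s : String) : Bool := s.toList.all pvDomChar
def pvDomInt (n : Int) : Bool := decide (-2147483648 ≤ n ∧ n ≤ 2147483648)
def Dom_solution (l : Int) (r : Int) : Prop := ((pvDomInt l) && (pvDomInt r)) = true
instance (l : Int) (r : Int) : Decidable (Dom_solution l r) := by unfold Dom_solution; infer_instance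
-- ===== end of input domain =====

-- B replaces A's string-building BFS + final sort by an arithmetic counter loop
-- (k ↦ binary digits of k read as decimal, ×5) that emits the candidates already
-- in increasing order; same return value on the whole domain (alternative algorithm).

-- ===== PORT A =====
-- A's while-loop over the deque, one step per popped string.  The fuel argument
-- is only a totality guard (proved never to run out on Dom inputs: at most
-- 1023 strings are ever popped when r ≤ 2^31); each step is A's loop body.
def aloopA (l : Int) (r : Int) : Nat → List String → List Int → List Int
  | 0, _, result => result
  | _ + 1, [], result => result
  | fuel + 1, current :: queue, result =>
    -- num = int(current); ValueError is unreachable: queue strings are digit strings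
    let num : Int := (PySem.Int.ofStr? current).getD 0
    if r < num then
      aloopA l r fuel queue result
    else
      let result := if l ≤ num then result ++ [num] else result
      aloopA l r fuel (queue ++ [current ++ "0", current ++ "5"]) result

def solution (l : Int) (r : Int) : List Int :=
  let result := aloopA l r 4096 ["5"] []
  if result.isEmpty then [-1] else PySem.List.sorted result (fun x => x)

-- ===== PORT B =====
-- val(k) = 0 if k == 0 else 10 * val(k >> 1) + 5 * (k & 1), ported with a fuel
-- counter (k halves each call, so fuel k suffices) to stay kernel-reducible.
def vGo : Nat → Nat → Int
  | _, 0 => 0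
  | 0, _ + 1 => 0
  | f + 1, k + 1 => 10 * vGo f ((k + 1) / 2) + 5 * ((k + 1) % 2)

def vAlt (k : Nat) : Int := vGo k k

-- B's while-loop: n = val(k); break when n > r, else collect if n ≥ l and k += 1.
-- The fuel is only a totality guard (on Dom inputs the loop breaks at k ≤ 512,
-- since val is strictly increasing and val 512 = 5·10^9 > 2^31, proved below).
def loopB (l : Int) (r : Int) : Nat → Nat → List Int → List Int
  | 0, _, res => res
  | fuel + 1, k, res =>
    let n := vAlt k
    if r < n then res
    else loopB l r fuel (k + 1) (if l ≤ n then res ++ [n] else res)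

def solution_alt (l : Int) (r : Int) : List Int :=
  let res := loopB l r 1024 1 []
  if res.isEmpty then [-1] else res

-- ===== PRECONDITION & SPEC =====
def Spec_solution (l : Int) (r : Int) (out : List Int) : Prop := out = solution_alt l r
instance (l : Int) (r : Int) (out : List Int) : Decidable (Spec_solution l r out) := by unfold Spec_solution; infer_instance

-- ===== CLAIM (what is proved, stated in full; the proofs are below) =====
def Claim_equal_solution : Prop := ∀ (l : Int) (r : Int), Dom_solution l r → Spec_solution l r (solution l r)

-- ===== LEMMAS AND PROOFS =====

theorem vGo_irrel : ∀ k f f', k ≤ f → k ≤ f' → vGo f k = vGo f' k := by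
  intro k
  induction k using Nat.strong_induction_on with
  | _ k ih =>
    intro f f' hf hf'
    match k, f, f', hf, hf' with
    | 0, 0, 0, _, _ => rfl
    | 0, 0, _ + 1, _, _ => rfl
    | 0, _ + 1, 0, _, _ => rfl
    | 0, _ + 1, _ + 1, _, _ => rfl
    | m + 1, g + 1, g' + 1, hf, hf' =>
      show 10 * vGo g ((m + 1) / 2) + _ = 10 * vGo g' ((m + 1) / 2) + _
      rw [ih ((m + 1) / 2) (by omega) g g' (by omega) (by omega)]

theorem vAlt_eq (k : Nat) : vAlt k = if k = 0 then 0 else 10 * vAlt (k / 2) + 5 * (k % 2) := by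
  match k with
  | 0 => rfl
  | m + 1 =>
    show vGo (m + 1) (m + 1) = _
    simp only [if_neg (Nat.succ_ne_zero m)]
    show 10 * vGo m ((m + 1) / 2) + 5 * ((m + 1) % 2)
       = 10 * vGo ((m + 1) / 2) ((m + 1) / 2) + 5 * ((m + 1) % 2)
    rw [vGo_irrel ((m + 1) / 2) m ((m + 1) / 2) (by omega) (by omega)]

theorem vAlt_lt_succ : ∀ k : Nat, vAlt k < vAlt (k + 1) := by
  intro k
  induction k using Nat.strong_induction_on with
  | _ k ih =>
    match k with
    | 0 => decide
    | m + 1 =>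
      rcases Nat.even_or_odd (m + 1) with ⟨t, ht⟩ | ⟨t, ht⟩
      · rw [vAlt_eq (m + 1), vAlt_eq (m + 2)]
        have h1 : (m + 1) / 2 = t := by omega
        have h2 : (m + 2) / 2 = t := by omega
        rw [h1, h2]
        simp only [if_neg (by omega : ¬ m + 1 = 0), if_neg (by omega : ¬ m + 2 = 0)]
        omega
      · have h1 : (m + 1) / 2 = t := by omega
        have h2 : (m + 2) / 2 = t + 1 := by omega
        have hlt : vAlt t < vAlt (t + 1) := ih t (by omega)
        rw [vAlt_eq (m + 1), vAlt_eq (m + 2), h1, h2]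
        simp only [if_neg (by omega : ¬ m + 1 = 0), if_neg (by omega : ¬ m + 2 = 0)]
        omega

theorem vAlt_strictMono : StrictMono vAlt := strictMono_nat_of_lt_succ vAlt_lt_succ

theorem vAlt_mono {j k : Nat} (h : j ≤ k) : vAlt j ≤ vAlt k := vAlt_strictMono.monotone h

theorem vAlt_ge5 : ∀ k, 1 ≤ k → 5 ≤ vAlt k := by
  intro k
  induction k using Nat.strong_induction_on with
  | _ k ih =>
    intro hk
    rw [vAlt_eq, if_neg (by omega)]
    rcases Nat.lt_or_ge k 2 with h2 | h2
    · have hk1 : k = 1 := by omega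
      subst hk1
      decide
    · have h0 : (0 : Int) ≤ vAlt (k / 2) := by
        have := vAlt_mono (Nat.zero_le (k / 2))
        simpa [vAlt] using this
      rcases Nat.even_or_odd k with ⟨t, ht⟩ | ⟨t, ht⟩
      · have := ih (k / 2) (by omega) (by omega)
        omega
      · omega

theorem vAlt_lower : ∀ t k, 2 ^ t ≤ k → 5 * 10 ^ t ≤ vAlt k := by
  intro t
  induction t with
  | zero => intro k hk; simpa using vAlt_ge5 k (by simpa using hk)
  | succ t ih =>
    intro k hk
    have hk2 : 2 ^ t ≤ k / 2 := by
      have : 2 ^ (t + 1) = 2 ^ t * 2 := by ring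
      omega
    have h1 := ih (k / 2) hk2
    have hkpos : k ≠ 0 := by
      have : 0 < 2 ^ (t + 1) := Nat.pow_pos (by omega)
      omega
    rw [vAlt_eq, if_neg hkpos]
    have : (10 : Int) ^ (t + 1) = 10 ^ t * 10 := by ring
    omega

theorem vAlt_big {k : Nat} (hk : 512 ≤ k) : (5000000000 : Int) ≤ vAlt k := by
  have := vAlt_lower 9 k (by norm_num; omega)
  norm_num at this
  omega

-- the digit string of the tree node with binary code k ('5' at the root,
-- a child appends '0' or '5'); fuel-structural so that `decide` can evaluate it
def cGo : Nat → Nat → List Char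
  | _, 0 => ['5']
  | 0, _ + 1 => ['5']
  | f + 1, k + 1 =>
    if k + 1 ≤ 1 then ['5']
    else cGo f ((k + 1) / 2) ++ [if (k + 1) % 2 = 0 then '0' else '5']

def chars5 (k : Nat) : List Char := cGo k k

theorem cGo_irrel : ∀ k f f', k ≤ f → k ≤ f' → cGo f k = cGo f' k := by
  intro k
  induction k using Nat.strong_induction_on with
  | _ k ih =>
    intro f f' hf hf'
    match k, f, f', hf, hf' with
    | 0, 0, 0, _, _ => rfl
    | 0, 0, _ + 1, _, _ => rfl
    | 0, _ + 1, 0, _, _ => rfl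
    | 0, _ + 1, _ + 1, _, _ => rfl
    | m + 1, g + 1, g' + 1, hf, hf' =>
      show (if m + 1 ≤ 1 then _ else cGo g ((m + 1) / 2) ++ _)
         = (if m + 1 ≤ 1 then _ else cGo g' ((m + 1) / 2) ++ _)
      by_cases h1 : m + 1 ≤ 1
      · simp [h1]
      · simp only [if_neg h1]
        rw [ih ((m + 1) / 2) (by omega) g g' (by omega) (by omega)]

theorem chars5_eq (k : Nat) (h : 2 ≤ k) :
    chars5 k = chars5 (k / 2) ++ [if k % 2 = 0 then '0' else '5'] := by
  match k, h with
  | m + 2, _ =>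
    show cGo (m + 2) (m + 2) = cGo ((m + 2) / 2) ((m + 2) / 2) ++ _
    show (if m + 2 ≤ 1 then _ else cGo (m + 1) ((m + 2) / 2) ++ _)
       = cGo ((m + 2) / 2) ((m + 2) / 2) ++ _
    rw [if_neg (by omega)]
    rw [cGo_irrel ((m + 2) / 2) (m + 1) ((m + 2) / 2) (by omega) (by omega)]

theorem chars5_even {k : Nat} (hk : 1 ≤ k) : chars5 (2 * k) = chars5 k ++ ['0'] := by
  rw [chars5_eq (2 * k) (by omega)]
  have h1 : 2 * k / 2 = k := by omega
  have h2 : 2 * k % 2 = 0 := by omega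
  rw [h1, h2]
  simp

theorem chars5_odd {k : Nat} (hk : 1 ≤ k) : chars5 (2 * k + 1) = chars5 k ++ ['5'] := by
  rw [chars5_eq (2 * k + 1) (by omega)]
  have h1 : (2 * k + 1) / 2 = k := by omega
  have h2 : (2 * k + 1) % 2 = 1 := by omega
  rw [h1, h2]
  simp

set_option maxRecDepth 20000 in
theorem parse5 : ∀ k : Nat, k < 1023 → PySem.Int.ofChars? (chars5 (k + 1)) = some (vAlt (k + 1)) := by decide

theorem parse5' {k : Nat} (h1 : 1 ≤ k) (h2 : k ≤ 1023) :
    PySem.Int.ofChars? (chars5 k) = some (vAlt k) := by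
  have := parse5 (k - 1) (by omega)
  have hk : k - 1 + 1 = k := by omega
  rwa [hk] at this

-- descendant relation in the binary tree of codes: j lies in the subtree of k
def Desc (k j : Nat) : Prop := ∃ m : Nat, j / 2 ^ m = k

theorem desc_self (k : Nat) : Desc k k := ⟨0, by simp⟩

theorem desc_le {k j : Nat} (h : Desc k j) : k ≤ j := by
  obtain ⟨m, hm⟩ := h
  have := Nat.div_le_self j (2 ^ m)
  omega

theorem desc_step {k c j : Nat} (hc : c / 2 = k) (h : Desc c j) : Desc k j := by
  obtain ⟨m, hm⟩ := h
  refine ⟨m + 1, ?_⟩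
  rw [pow_succ, ← Nat.div_div_eq_div_mul, hm, hc]

theorem desc_split {k j : Nat} (h : Desc k j) (hne : j ≠ k) :
    Desc (2 * k) j ∨ Desc (2 * k + 1) j := by
  obtain ⟨m, hm⟩ := h
  match m, hm with
  | 0, hm => simp at hm; omega
  | m + 1, hm =>
    have hdiv : j / 2 ^ m / 2 = k := by
      rw [Nat.div_div_eq_div_mul, ← pow_succ]; exact hm
    rcases Nat.even_or_odd (j / 2 ^ m) with ⟨t, ht⟩ | ⟨t, ht⟩
    · left; exact ⟨m, by omega⟩
    · right; exact ⟨m, by omega⟩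

theorem desc_one {j : Nat} (hj : 1 ≤ j) : Desc 1 j := by
  refine ⟨Nat.log2 j, ?_⟩
  have h1 : 2 ^ Nat.log2 j ≤ j := Nat.log2_self_le (by omega)
  have h2 : j < 2 ^ (Nat.log2 j + 1) := Nat.lt_log2_self
  rw [pow_succ] at h2
  have := Nat.div_eq_of_lt_le (by omega : 1 * 2 ^ Nat.log2 j ≤ j)
    (by omega : j < (1 + 1) * 2 ^ Nat.log2 j)
  simpa using this

theorem div_pow_sub {j m m' : Nat} (h : m ≤ m') :
    j / 2 ^ m' = (j / 2 ^ m) / 2 ^ (m' - m) := by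
  rw [Nat.div_div_eq_div_mul, ← pow_add, Nat.add_sub_cancel' h]

theorem desc_disj {k j : Nat} (hk : 1 ≤ k) (h0 : Desc (2 * k) j) (h1 : Desc (2 * k + 1) j) : False := by
  obtain ⟨m, hm⟩ := h0
  obtain ⟨m', hm'⟩ := h1
  rcases Nat.lt_trichotomy m m' with hlt | heq | hlt
  · have e := div_pow_sub (j := j) (le_of_lt hlt)
    rw [hm, hm'] at e
    -- 2k+1 = 2k / 2^(m'-m) with m'-m ≥ 1
    have hd : 2 ≤ 2 ^ (m' - m) := by
      calc (2 : Nat) = 2 ^ 1 := by norm_num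
      _ ≤ 2 ^ (m' - m) := Nat.pow_le_pow_right (by omega) (by omega)
    have hle2 : 2 * k / 2 ^ (m' - m) ≤ 2 * k / 2 := Nat.div_le_div_left hd (by omega)
    have h2 : 2 * k / 2 = k := by omega
    omega
  · subst heq; omega
  · have e := div_pow_sub (j := j) (le_of_lt hlt)
    rw [hm, hm'] at e
    have hd : 2 ≤ 2 ^ (m - m') := by
      calc (2 : Nat) = 2 ^ 1 := by norm_num
      _ ≤ 2 ^ (m - m') := Nat.pow_le_pow_right (by omega) (by omega)
    have hle2 : (2 * k + 1) / 2 ^ (m - m') ≤ (2 * k + 1) / 2 := Nat.div_le_div_left hd (by omega)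
    have h2 : (2 * k + 1) / 2 = k := by omega
    omega

-- the (pruned) subtree of collected values below code k, in DFS order
def col (l : Int) (r : Int) (k : Nat) : List Int :=
  if k = 0 ∨ 512 ≤ k ∨ r < vAlt k then []
  else (if l ≤ vAlt k then [vAlt k] else []) ++ col l r (2 * k) ++ col l r (2 * k + 1)
termination_by 512 - k
decreasing_by all_goals { simp only [not_or, not_lt, not_le] at *; omega }

-- number of loop iterations (pops) A spends on the subtree of code k
def sz (r : Int) (k : Nat) : Nat :=
  if k = 0 ∨ 512 ≤ k ∨ r < vAlt k then 1
  else 1 + sz r (2 * k) + sz r (2 * k + 1)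
termination_by 512 - k
decreasing_by all_goals { simp only [not_or, not_lt, not_le] at *; omega }

theorem sz_pos (r : Int) (k : Nat) : 1 ≤ sz r k := by
  rw [sz]; split <;> omega

theorem sz_le (r : Int) : ∀ t : Nat, ∀ k, 512 ≤ k * 2 ^ t → sz r k ≤ 2 ^ (t + 1) - 1 := by
  intro t
  induction t with
  | zero =>
    intro k h
    simp only [pow_zero, Nat.mul_one] at h
    rw [sz, if_pos (Or.inr (Or.inl h))]
    norm_num
  | succ t ih =>
    intro k h
    have e2 : (2 : Nat) ^ (t + 1 + 1) = 2 * 2 ^ (t + 1) := by ring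
    have hp : 0 < (2 : Nat) ^ (t + 1) := Nat.pow_pos (by omega)
    rw [sz]
    split
    · omega
    · have hmul : k * 2 ^ (t + 1) = 2 * k * 2 ^ t := by ring
      rw [hmul] at h
      have h1 := ih (2 * k) h
      have h2 := ih (2 * k + 1)
        (le_trans h (Nat.mul_le_mul (by omega : 2 * k ≤ 2 * k + 1) (le_refl (2 ^ t))))
      omega

theorem col_empty_of_big (l r : Int) (hr : r ≤ 2147483648) {k : Nat} (h512 : 512 ≤ k) (x : Int) :
    ¬ (∃ j, Desc k j ∧ x = vAlt j ∧ l ≤ x ∧ x ≤ r) := by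
  rintro ⟨j, hd, rfl, hl, hxr⟩
  have : (5000000000 : Int) ≤ vAlt j := vAlt_big (le_trans h512 (desc_le hd))
  omega

theorem mem_col (l r : Int) (hr : r ≤ 2147483648) :
    ∀ n : Nat, ∀ k, 512 - k ≤ n → 1 ≤ k → ∀ x,
      (x ∈ col l r k ↔ ∃ j, Desc k j ∧ x = vAlt j ∧ l ≤ x ∧ x ≤ r) := by
  intro n
  induction n with
  | zero =>
    intro k hkn hk x
    have h512 : 512 ≤ k := by omega
    rw [col, if_pos (Or.inr (Or.inl h512))]
    simp only [List.not_mem_nil, false_iff]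
    exact col_empty_of_big l r hr h512 x
  | succ n ih =>
    intro k hkn hk x
    by_cases hbig : 512 ≤ k
    · rw [col, if_pos (Or.inr (Or.inl hbig))]
      simp only [List.not_mem_nil, false_iff]
      exact col_empty_of_big l r hr hbig x
    · by_cases hcut : r < vAlt k
      · rw [col, if_pos (Or.inr (Or.inr hcut))]
        simp only [List.not_mem_nil, false_iff]
        rintro ⟨j, hd, rfl, hl, hxr⟩
        have := vAlt_mono (desc_le hd)
        omega
      · rw [col, if_neg (by push_neg; exact ⟨by omega, by omega, not_lt.mp hcut⟩)]
        have ih2k := ih (2 * k) (by omega) (by omega) x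
        have ih2k1 := ih (2 * k + 1) (by omega) (by omega) x
        simp only [List.mem_append]
        constructor
        · rintro ((h | h) | h)
          · by_cases hl : l ≤ vAlt k
            · rw [if_pos hl] at h
              simp only [List.mem_singleton] at h
              subst h
              exact ⟨k, desc_self k, rfl, hl, not_lt.mp hcut⟩
            · rw [if_neg hl] at h
              simp at h
          · obtain ⟨j, hd, hxx, hlx, hxr⟩ := ih2k.mp h
            exact ⟨j, desc_step (by omega : 2 * k / 2 = k) hd, hxx, hlx, hxr⟩
          · obtain ⟨j, hd, hxx, hlx, hxr⟩ := ih2k1.mp h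
            exact ⟨j, desc_step (by omega : (2 * k + 1) / 2 = k) hd, hxx, hlx, hxr⟩
        · rintro ⟨j, hd, rfl, hlx, hxr⟩
          by_cases hjk : j = k
          · subst hjk
            left; left
            rw [if_pos hlx]
            simp
          · rcases desc_split hd hjk with h | h
            · left; right
              exact ih2k.mpr ⟨j, h, rfl, hlx, hxr⟩
            · right
              exact ih2k1.mpr ⟨j, h, rfl, hlx, hxr⟩

theorem nodup_col (l r : Int) (hr : r ≤ 2147483648) :
    ∀ n : Nat, ∀ k, 512 - k ≤ n → 1 ≤ k → (col l r k).Nodup := by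
  intro n
  induction n with
  | zero =>
    intro k hkn hk
    have h512 : 512 ≤ k := by omega
    rw [col, if_pos (Or.inr (Or.inl h512))]
    exact List.nodup_nil
  | succ n ih =>
    intro k hkn hk
    by_cases hbig : 512 ≤ k
    · rw [col, if_pos (Or.inr (Or.inl hbig))]
      exact List.nodup_nil
    · by_cases hcut : r < vAlt k
      · rw [col, if_pos (Or.inr (Or.inr hcut))]
        exact List.nodup_nil
      · rw [col, if_neg (by push_neg; exact ⟨by omega, by omega, not_lt.mp hcut⟩)]
        have ih2k := ih (2 * k) (by omega) (by omega)
        have ih2k1 := ih (2 * k + 1) (by omega) (by omega)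
        have m2k := mem_col l r hr n (2 * k) (by omega) (by omega)
        have m2k1 := mem_col l r hr n (2 * k + 1) (by omega) (by omega)
        rw [List.nodup_append, List.nodup_append]
        refine ⟨⟨?_, ih2k, ?_⟩, ih2k1, ?_⟩
        · split <;> simp
        · intro x hx y hy
          obtain ⟨j, hd, rfl, _, _⟩ := (m2k y).mp hy
          have hjk : k < j := lt_of_lt_of_le (by omega) (desc_le hd)
          have hlt := vAlt_strictMono hjk
          by_cases hl : l ≤ vAlt k
          · rw [if_pos hl] at hx
            simp only [List.mem_singleton] at hx
            subst hx
            omega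
          · rw [if_neg hl] at hx
            exact absurd hx (by simp)
        · intro x hx y hy
          obtain ⟨j', hd', rfl, _, _⟩ := (m2k1 y).mp hy
          rcases List.mem_append.mp hx with hx | hx
          · have hjk : k < j' := lt_of_lt_of_le (by omega) (desc_le hd')
            have hlt := vAlt_strictMono hjk
            by_cases hl : l ≤ vAlt k
            · rw [if_pos hl] at hx
              simp only [List.mem_singleton] at hx
              subst hx
              omega
            · rw [if_neg hl] at hx
              exact absurd hx (by simp)
          · obtain ⟨j, hd, rfl, _, _⟩ := (m2k x).mp hx
            intro heq
            have hjj : j = j' := vAlt_strictMono.injective heq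
            subst hjj
            exact desc_disj hk hd hd'

theorem loopB_append (l r : Int) :
    ∀ fuel k res, loopB l r fuel k res = res ++ loopB l r fuel k [] := by
  intro fuel
  induction fuel with
  | zero => intro k res; simp [loopB]
  | succ f ih =>
    intro k res
    simp only [loopB]
    by_cases hcut : r < vAlt k
    · simp [hcut]
    · simp only [if_neg hcut]
      rw [ih (k + 1) (if l ≤ vAlt k then res ++ [vAlt k] else res),
          ih (k + 1) (if l ≤ vAlt k then [] ++ [vAlt k] else [])]
      by_cases hl : l ≤ vAlt k <;> simp [hl]

theorem mem_lB (l r : Int) (hr : r ≤ 2147483648) :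
    ∀ fuel k, 512 ≤ k + fuel → ∀ x,
      (x ∈ loopB l r fuel k [] ↔ ∃ j, k ≤ j ∧ x = vAlt j ∧ l ≤ x ∧ x ≤ r) := by
  intro fuel
  induction fuel with
  | zero =>
    intro k hk x
    simp only [loopB, List.not_mem_nil, false_iff]
    rintro ⟨j, hj, rfl, _, hxr⟩
    have := vAlt_big (k := j) (by omega)
    omega
  | succ f ih =>
    intro k hk x
    by_cases hcut : r < vAlt k
    · simp only [loopB, if_pos hcut, List.not_mem_nil, false_iff]
      rintro ⟨j, hj, rfl, _, hxr⟩
      have := vAlt_mono hj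
      omega
    · have ihk := ih (k + 1) (by omega) x
      simp only [loopB, if_neg hcut]
      rw [loopB_append l r f (k + 1) _]
      simp only [List.mem_append]
      constructor
      · rintro (h | h)
        · by_cases hl : l ≤ vAlt k
          · rw [if_pos hl] at h
            simp only [List.nil_append, List.mem_singleton] at h
            subst h
            exact ⟨k, le_rfl, rfl, hl, not_lt.mp hcut⟩
          · rw [if_neg hl] at h
            simp at h
        · obtain ⟨j, hj, hxj, hlx, hxr⟩ := ihk.mp h
          exact ⟨j, by omega, hxj, hlx, hxr⟩
      · rintro ⟨j, hj, rfl, hlx, hxr⟩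
        by_cases hjk : j = k
        · subst hjk
          left
          rw [if_pos hlx]
          simp
        · right
          exact ihk.mpr ⟨j, by omega, rfl, hlx, hxr⟩

theorem pairwise_lB (l r : Int) (hr : r ≤ 2147483648) :
    ∀ fuel k, 512 ≤ k + fuel → (loopB l r fuel k []).Pairwise (· < ·) := by
  intro fuel
  induction fuel with
  | zero => intro k hk; simp [loopB]
  | succ f ih =>
    intro k hk
    by_cases hcut : r < vAlt k
    · simp [loopB, hcut]
    · simp only [loopB, if_neg hcut]
      rw [loopB_append l r f (k + 1) _]
      apply List.pairwise_append.mpr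
      refine ⟨?_, ih (k + 1) (by omega), ?_⟩
      · split <;> simp
      · intro a ha b hb
        obtain ⟨j, hj, rfl, _, _⟩ := (mem_lB l r hr f (k + 1) (by omega) b).mp hb
        by_cases hl : l ≤ vAlt k
        · rw [if_pos hl] at ha
          simp only [List.nil_append, List.mem_singleton] at ha
          subst ha
          exact vAlt_strictMono (by omega)
        · rw [if_neg hl] at ha
          simp at ha

theorem perm_shuffle {α : Type} (res opt F C : List α) :
    (res ++ (opt ++ (F ++ C))).Perm (res ++ (opt ++ (C ++ F))) :=
  ((List.perm_append_comm).append_left opt).append_left res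

theorem ofList_append_char (cs : List Char) (c : Char) :
    String.ofList cs ++ String.ofList [c] = String.ofList (cs ++ [c]) :=
  String.toList_inj.mp (by simp)

theorem aloop_perm (l r : Int) (hr : r ≤ 2147483648) :
    ∀ fuel : Nat, ∀ K : List Nat, ∀ res : List Int,
      (∀ k ∈ K, 1 ≤ k ∧ k ≤ 1023) →
      (K.map (sz r)).sum ≤ fuel →
      (aloopA l r fuel (K.map (fun k => String.ofList (chars5 k))) res).Perm
        (res ++ K.flatMap (col l r)) := by
  intro fuel
  induction fuel with
  | zero =>
    intro K res hK hs
    match K with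
    | [] => simp [aloopA]
    | k :: K' =>
      exfalso
      have := sz_pos r k
      simp [List.map_cons, List.sum_cons] at hs
      omega
  | succ f ih =>
    intro K res hK hs
    match K with
    | [] => simp [aloopA]
    | k :: K' =>
      obtain ⟨hk1, hk2⟩ := hK k (List.mem_cons_self)
      have hnum : (PySem.Int.ofStr? (String.ofList (chars5 k))).getD 0 = vAlt k := by
        rw [PySem.Int.ofStr?_ofList, parse5' hk1 hk2]
        rfl
      have hszk : sz r k + (K'.map (sz r)).sum ≤ f + 1 := by
        simpa using hs
      simp only [List.map_cons]
      rw [aloopA]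
      simp only [hnum]
      by_cases hcut : r < vAlt k
      · rw [if_pos hcut]
        have hcol : col l r k = [] := by
          rw [col, if_pos (Or.inr (Or.inr hcut))]
        have hsum : (K'.map (sz r)).sum ≤ f := by
          have := sz_pos r k
          omega
        have := ih K' res (fun j hj => hK j (List.mem_cons_of_mem _ hj)) hsum
        simpa [hcol] using this
      · rw [if_neg hcut]
        have hk511 : k ≤ 511 := by
          by_contra hgt
          have := vAlt_big (k := k) (by omega)
          omega
        have hch0 : String.ofList (chars5 k) ++ "0" = String.ofList (chars5 (2 * k)) := by
          rw [chars5_even hk1]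
          exact ofList_append_char (chars5 k) '0'
        have hch5 : String.ofList (chars5 k) ++ "5" = String.ofList (chars5 (2 * k + 1)) := by
          rw [chars5_odd hk1]
          exact ofList_append_char (chars5 k) '5'
        have hqueue : K'.map (fun k => String.ofList (chars5 k)) ++
            [String.ofList (chars5 k) ++ "0", String.ofList (chars5 k) ++ "5"]
            = (K' ++ [2 * k, 2 * k + 1]).map (fun k => String.ofList (chars5 k)) := by
          rw [hch0, hch5]
          simp
        have hKb : ∀ j ∈ K' ++ [2 * k, 2 * k + 1], 1 ≤ j ∧ j ≤ 1023 := by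
          intro j hj
          rcases List.mem_append.mp hj with hj | hj
          · exact hK j (List.mem_cons_of_mem _ hj)
          · simp only [List.mem_cons, List.mem_singleton] at hj
            rcases hj with rfl | rfl | h
            · omega
            · omega
            · simp at h
        have hszeq : sz r k = 1 + sz r (2 * k) + sz r (2 * k + 1) := by
          rw [sz, if_neg (by push_neg; exact ⟨by omega, by omega, not_lt.mp hcut⟩)]
        have hsum : ((K' ++ [2 * k, 2 * k + 1]).map (sz r)).sum ≤ f := by
          simp only [List.map_append, List.sum_append, List.map_cons, List.map_nil,
            List.sum_cons, List.sum_nil]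
          omega
        have hperm := ih (K' ++ [2 * k, 2 * k + 1])
          (if l ≤ vAlt k then res ++ [vAlt k] else res) hKb hsum
        rw [hqueue]
        refine hperm.trans ?_
        have hcolk : col l r k =
            (if l ≤ vAlt k then [vAlt k] else []) ++ col l r (2 * k) ++ col l r (2 * k + 1) := by
          rw [col, if_neg (by push_neg; exact ⟨by omega, by omega, not_lt.mp hcut⟩)]
        simp only [List.flatMap_append, List.flatMap_cons, List.flatMap_nil, List.append_nil]
        rw [hcolk]
        have hsh := perm_shuffle res (if l ≤ vAlt k then [vAlt k] else [])
          (K'.flatMap (col l r)) (col l r (2 * k) ++ col l r (2 * k + 1))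
        by_cases hl : l ≤ vAlt k
        · simp only [if_pos hl] at hsh ⊢
          simp only [List.append_assoc] at hsh ⊢
          exact hsh
        · simp only [if_neg hl] at hsh ⊢
          simp only [List.append_assoc, List.nil_append] at hsh ⊢
          exact hsh

-- ===== VERDICT (by name: the statement is the Claim_ definition above) =====
theorem desc_one_iff {j : Nat} : Desc 1 j ↔ 1 ≤ j :=
  ⟨fun h => desc_le h, fun h => desc_one h⟩

theorem solution_spec : Claim_equal_solution := by
  intro l r hdom
  have hr : r ≤ 2147483648 := by
    unfold Dom_solution pvDomInt at hdom
    simp only [Bool.and_eq_true, decide_eq_true_eq] at hdom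
    omega
  unfold Spec_solution solution solution_alt
  have hK : ["5"] = [1].map (fun k => String.ofList (chars5 k)) := by decide
  have hsz : (([1] : List Nat).map (sz r)).sum ≤ 4096 := by
    have h := sz_le r 9 1 (by norm_num)
    simp only [List.map_cons, List.map_nil, List.sum_cons, List.sum_nil]
    norm_num at h
    omega
  have hperm0 := aloop_perm l r hr 4096 [1] [] (by simp) hsz
  rw [← hK] at hperm0
  simp only [List.nil_append, List.flatMap_cons, List.flatMap_nil, List.append_nil] at hperm0
  -- hperm0 : (aloopA l r 4096 ["5"] []).Perm (col l r 1)
  have hmc := mem_col l r hr 512 1 (by omega) (by omega)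
  have hml := mem_lB l r hr 1024 1 (by omega)
  have hiff : ∀ x, x ∈ col l r 1 ↔ x ∈ loopB l r 1024 1 [] := by
    intro x
    rw [hmc x, hml x]
    constructor
    · rintro ⟨j, hd, hx⟩
      exact ⟨j, desc_one_iff.mp hd, hx⟩
    · rintro ⟨j, hj, hx⟩
      exact ⟨j, desc_one_iff.mpr hj, hx⟩
  have hpw := pairwise_lB l r hr 1024 1 (by omega)
  have hnd2 : (loopB l r 1024 1 []).Nodup := hpw.imp (fun h => ne_of_lt h)
  have hnd1 := nodup_col l r hr 512 1 (by omega) (by omega)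
  have hperm2 : (col l r 1).Perm (loopB l r 1024 1 []) :=
    (List.perm_ext_iff_of_nodup hnd1 hnd2).mpr hiff
  have hPerm : (aloopA l r 4096 ["5"] []).Perm (loopB l r 1024 1 []) := hperm0.trans hperm2
  by_cases hL : loopB l r 1024 1 [] = []
  · have hres : aloopA l r 4096 ["5"] [] = [] := by
      rw [hL] at hPerm
      exact hPerm.eq_nil
    simp [hres, hL]
  · have hres : aloopA l r 4096 ["5"] [] ≠ [] := by
      intro h
      rw [h] at hPerm
      exact hL (hPerm.symm.eq_nil)
    have hsorted : PySem.List.sorted (aloopA l r 4096 ["5"] []) (fun x => x) = loopB l r 1024 1 [] :=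
      PySem.List.sorted_eq_of_perm_of_pairwise_lt _ _ _ hPerm.symm hpw
    simp [hres, hL, hsorted, List.isEmpty_iff]
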